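-- pv_equiv track=rewrite | github.com/Intelligent-CAT-Lab/RE2Bench | scripts/prompting/parsing_utils.py | _find_value_bounds
-- ===== SOURCE A (Python) =====
-- from typing import Tuple, Optional
--
-- def _not_in_string_mask(s: str):
--     """Return a boolean list: True for positions outside double-quoted strings."""
--     mask, in_str, esc = [True]*len(s), False, False
--     for i, ch in enumerate(s):
--         if esc:
--             esc = False
--             mask[i] = not in_str
--             continue
--         if ch == "\\":
--             esc = True
--             mask[i] = not in_str
--             continue
--         if ch == '"':
--             in_str = not in_str
--             mask[i] = not in_str
--             continue
--         mask[i] = not in_str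
--     return mask
--
-- def _find_value_bounds(doc: str, err_pos: int) -> Tuple[int, int]:
--     """
--     From an error position, find the nearest preceding ':' (outside strings)
--     and compute the value [start, end) span following that colon.
--     Value ends at the first comma or closing brace/bracket at zero nesting,
--     respecting quotes and tolerating parentheses inside.
--     """
--     mask = _not_in_string_mask(doc)
--
--     # find preceding colon outside strings
--     i = err_pos
--     while i >= 0:
--         if mask[i] and doc[i] == ":":
--             break
--         i -= 1
--     if i < 0:
--         return (err_pos, err_pos)  # give up
--
--     # skip spaces after colon to value start
--     start = i + 1
--     n = len(doc)
--     while start < n and doc[start].isspace():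
--         start += 1
--
--     # scan forward to find value end
--     depth_brace = depth_brack = depth_paren = 0
--     in_str = False
--     esc = False
--     j = start
--     while j < n:
--         ch = doc[j]
--         if esc:
--             esc = False
--             j += 1
--             continue
--         if ch == "\\" and in_str:
--             esc = True
--             j += 1
--             continue
--         if ch == '"':
--             in_str = not in_str
--             j += 1
--             continue
--         if not in_str:
--             if ch == "{": depth_brace += 1
--             elif ch == "}":
--                 if depth_brace == 0 and depth_brack == 0 and depth_paren == 0:
--                     break
--                 depth_brace = max(0, depth_brace-1)
--             elif ch == "[": depth_brack += 1
--             elif ch == "]":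
--                 if depth_brace == 0 and depth_brack == 0 and depth_paren == 0:
--                     break
--                 depth_brack = max(0, depth_brack-1)
--             elif ch == "(": depth_paren += 1
--             elif ch == ")": depth_paren = max(0, depth_paren-1)
--             elif ch == "," and depth_brace == 0 and depth_brack == 0 and depth_paren == 0:
--                 break
--         j += 1
--     end = j  # exclusive
--     return (start, end)
-- ===== SOURCE B (Python) =====
-- from typing import Tuple
--
-- def _value_len(s: str) -> int:
--     """Length of the value at the start of s (scan to first top-level , } ])."""
--     depth_brace = depth_brack = depth_paren = 0
--     in_str = esc = False
--     for k, ch in enumerate(s):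
--         if esc:
--             esc = False
--             continue
--         if ch == "\\" and in_str:
--             esc = True
--             continue
--         if ch == '"':
--             in_str = not in_str
--             continue
--         if not in_str:
--             if ch == "{":
--                 depth_brace += 1
--             elif ch == "}":
--                 if depth_brace == depth_brack == depth_paren == 0:
--                     return k
--                 depth_brace = max(0, depth_brace - 1)
--             elif ch == "[":
--                 depth_brack += 1
--             elif ch == "]":
--                 if depth_brace == depth_brack == depth_paren == 0:
--                     return k
--                 depth_brack = max(0, depth_brack - 1)
--             elif ch == "(":
--                 depth_paren += 1
--             elif ch == ")":
--                 depth_paren = max(0, depth_paren - 1)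
--             elif ch == "," and depth_brace == depth_brack == depth_paren == 0:
--                 return k
--     return len(s)
--
-- def _find_value_bounds(doc: str, err_pos: int) -> Tuple[int, int]:
--     # One forward pass: remember the last ':' outside strings at index <= err_pos.
--     colon = -1
--     in_str = esc = False
--     for i, ch in enumerate(doc):
--         if esc:
--             esc = False
--         elif ch == "\\":
--             esc = True
--             continue
--         elif ch == '"':
--             in_str = not in_str
--             continue
--         if ch == ":" and not in_str and i <= err_pos:
--             colon = i
--     if colon < 0:
--         return (err_pos, err_pos)
--     tail = doc[colon + 1:]
--     start = colon + 1 + (len(tail) - len(tail.lstrip()))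
--     return (start, start + _value_len(doc[start:]))
-- ===== Notes on version B (the rewrite author's own statement) =====
-- stated objective: alternative
-- what changed: B replaces A's precomputed not-in-string boolean mask plus backward scan by a single forward pass that tracks the in-string/escape state and remembers the last colon index <= err_pos, and computes the value start via lstrip on the tail and the value end via a helper over the suffix; this never indexes err_pos so it cannot raise.
import Mathlib
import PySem

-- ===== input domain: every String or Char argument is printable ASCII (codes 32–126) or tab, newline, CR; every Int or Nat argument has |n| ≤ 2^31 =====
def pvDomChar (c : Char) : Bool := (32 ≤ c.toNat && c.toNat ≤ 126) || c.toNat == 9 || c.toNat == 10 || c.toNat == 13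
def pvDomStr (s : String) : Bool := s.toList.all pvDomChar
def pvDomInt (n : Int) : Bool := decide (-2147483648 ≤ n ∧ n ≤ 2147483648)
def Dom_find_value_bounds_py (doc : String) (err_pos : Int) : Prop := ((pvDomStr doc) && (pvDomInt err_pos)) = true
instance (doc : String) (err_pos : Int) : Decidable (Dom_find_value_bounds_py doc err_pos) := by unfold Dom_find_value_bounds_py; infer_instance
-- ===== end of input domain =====

-- B replaces A's not-in-string mask table + backward colon scan by one forward pass that
-- remembers the last colon outside strings at index ≤ err_pos (objective: alternative).
-- Neither implementation mutates its arguments; the claim is about the return value.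

-- ===== PORT A =====
-- _not_in_string_mask: builds the boolean mask list (True = outside a double-quoted string)
def maskGoA : List Char → Bool → Bool → List Bool
  | [], _, _ => []
  | ch :: rest, inS, esc =>
    if esc then (!inS) :: maskGoA rest inS false
    else if ch = '\\' then (!inS) :: maskGoA rest inS true
    else if ch = '"' then (!(!inS)) :: maskGoA rest (!inS) false
    else (!inS) :: maskGoA rest inS false

def downA (mask : List Bool) (chars : List Char) : Nat → Option Nat
  | 0 => if mask.getD 0 false && (chars.getD 0 ' ' == ':') then some 0 else none
  | i+1 => if mask.getD (i+1) false && (chars.getD (i+1) ' ' == ':') then some (i+1) else downA mask chars i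

def skipA (chars : List Char) : Nat → Nat → Nat
  | 0, start => start
  | fuel+1, start =>
    if start < chars.length ∧ PySem.Chars.isspace (chars.getD start ' ') = true then
      skipA chars fuel (start+1)
    else start

def scanA (chars : List Char) : Nat → Nat → Int → Int → Int → Bool → Bool → Nat
  | 0, j, _, _, _, _, _ => j
  | fuel+1, j, db, dk, dp, inS, esc =>
    if j < chars.length then
      if esc = true then scanA chars fuel (j+1) db dk dp inS false
      else if chars.getD j ' ' = '\\' ∧ inS = true then scanA chars fuel (j+1) db dk dp inS true
      else if chars.getD j ' ' = '"' then scanA chars fuel (j+1) db dk dp (!inS) false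
      else if inS = false then
        if chars.getD j ' ' = '{' then scanA chars fuel (j+1) (db+1) dk dp inS esc
        else if chars.getD j ' ' = '}' then
          if db = 0 ∧ dk = 0 ∧ dp = 0 then j
          else scanA chars fuel (j+1) (max 0 (db-1)) dk dp inS esc
        else if chars.getD j ' ' = '[' then scanA chars fuel (j+1) db (dk+1) dp inS esc
        else if chars.getD j ' ' = ']' then
          if db = 0 ∧ dk = 0 ∧ dp = 0 then j
          else scanA chars fuel (j+1) db (max 0 (dk-1)) dp inS esc
        else if chars.getD j ' ' = '(' then scanA chars fuel (j+1) db dk (dp+1) inS esc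
        else if chars.getD j ' ' = ')' then scanA chars fuel (j+1) db dk (max 0 (dp-1)) inS esc
        else if chars.getD j ' ' = ',' ∧ db = 0 ∧ dk = 0 ∧ dp = 0 then j
        else scanA chars fuel (j+1) db dk dp inS esc
      else scanA chars fuel (j+1) db dk dp inS esc
    else j

def find_value_bounds_py (doc : String) (err_pos : Int) : Int × Int :=
  let chars := doc.toList
  let mask := maskGoA chars false false
  if err_pos < 0 then (err_pos, err_pos)
  else
    match downA mask chars err_pos.toNat with
    | none => (err_pos, err_pos)
    | some i =>
      let start := skipA chars chars.length (i+1)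
      let e := scanA chars chars.length start 0 0 0 false false
      ((start : Int), (e : Int))

-- ===== PORT B =====
-- one forward pass: last ':' outside strings with index ≤ err_pos (colon = -1 sentinel)
def colGoB (err_pos : Int) : List Char → Nat → Bool → Bool → Int → Int
  | [], _, _, _, colon => colon
  | ch :: rest, i, inS, esc, colon =>
    if esc = true then
      colGoB err_pos rest (i+1) inS false
        (if ch = ':' ∧ inS = false ∧ (i : Int) ≤ err_pos then (i : Int) else colon)
    else if ch = '\\' then colGoB err_pos rest (i+1) inS true colon
    else if ch = '"' then colGoB err_pos rest (i+1) (!inS) false colon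
    else
      colGoB err_pos rest (i+1) inS false
        (if ch = ':' ∧ inS = false ∧ (i : Int) ≤ err_pos then (i : Int) else colon)

def valueLenB : List Char → Int → Int → Int → Bool → Bool → Nat
  | [], _, _, _, _, _ => 0
  | ch :: rest, db, dk, dp, inS, esc =>
    if esc = true then valueLenB rest db dk dp inS false + 1
    else if ch = '\\' ∧ inS = true then valueLenB rest db dk dp inS true + 1
    else if ch = '"' then valueLenB rest db dk dp (!inS) false + 1
    else if inS = false then
      if ch = '{' then valueLenB rest (db+1) dk dp inS esc + 1
      else if ch = '}' then
        if db = 0 ∧ dk = 0 ∧ dp = 0 then 0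
        else valueLenB rest (max 0 (db-1)) dk dp inS esc + 1
      else if ch = '[' then valueLenB rest db (dk+1) dp inS esc + 1
      else if ch = ']' then
        if db = 0 ∧ dk = 0 ∧ dp = 0 then 0
        else valueLenB rest db (max 0 (dk-1)) dp inS esc + 1
      else if ch = '(' then valueLenB rest db dk (dp+1) inS esc + 1
      else if ch = ')' then valueLenB rest db dk (max 0 (dp-1)) inS esc + 1
      else if ch = ',' ∧ db = 0 ∧ dk = 0 ∧ dp = 0 then 0
      else valueLenB rest db dk dp inS esc + 1
    else valueLenB rest db dk dp inS esc + 1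

def find_value_bounds_py_alt (doc : String) (err_pos : Int) : Int × Int :=
  let chars := doc.toList
  let colon := colGoB err_pos chars 0 false false (-1)
  if colon < 0 then (err_pos, err_pos)
  else
    let tail := PySem.List.slice chars (some (colon + 1)) none
    let start := colon + 1 + ((tail.length : Int) - ((PySem.Chars.lstrip tail).length : Int))
    (start, start + (valueLenB (PySem.List.slice chars (some start) none) 0 0 0 false false : Int))

-- ===== PRECONDITION & SPEC =====
-- Pre_ excludes exactly the inputs where A raises IndexError (err_pos ≥ len(doc):
-- the backward scan starts by reading mask[err_pos]); A returns on every other input.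
def Pre_find_value_bounds_py (doc : String) (err_pos : Int) : Prop :=
  err_pos < PySem.Str.len doc
instance (doc : String) (err_pos : Int) : Decidable (Pre_find_value_bounds_py doc err_pos) := by
  unfold Pre_find_value_bounds_py; infer_instance

def pvWitness_find_value_bounds_py : String × Int := ("{\"a\": 12}", 7)

def Spec_find_value_bounds_py (doc : String) (err_pos : Int) (out : Int × Int) : Prop :=
  out = find_value_bounds_py_alt doc err_pos
instance (doc : String) (err_pos : Int) (out : Int × Int) : Decidable (Spec_find_value_bounds_py doc err_pos out) := by
  unfold Spec_find_value_bounds_py; infer_instance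

-- ===== CLAIM (what is proved, stated in full; the proofs are below) =====
def Claim_equal_find_value_bounds_py : Prop := ∀ (doc : String) (err_pos : Int), Dom_find_value_bounds_py doc err_pos → Pre_find_value_bounds_py doc err_pos → Spec_find_value_bounds_py doc err_pos (find_value_bounds_py doc err_pos)


-- ===== LEMMAS AND PROOFS =====
def hitsIdx : List Char → Bool → Bool → Nat → List Nat
  | [], _, _, _ => []
  | ch :: rest, inS, esc, i0 =>
    if esc = true then (if ch = ':' ∧ inS = false then [i0] else []) ++ hitsIdx rest inS false (i0+1)
    else if ch = '\\' then hitsIdx rest inS true (i0+1)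
    else if ch = '"' then hitsIdx rest (!inS) false (i0+1)
    else (if ch = ':' ∧ inS = false then [i0] else []) ++ hitsIdx rest inS false (i0+1)

theorem filter_range_cons (p : Nat → Bool) (n : Nat) (i0 : Nat) :
    ((List.range (n+1)).filter p).map (i0 + ·) =
      (if p 0 then [i0] else []) ++ ((List.range n).filter (fun k => p (k+1))).map ((i0+1) + ·) := by
  rw [List.range_succ_eq_map, List.filter_cons]
  have hrest : ((List.map Nat.succ (List.range n)).filter p).map (i0 + ·) =
      ((List.range n).filter (fun k => p (k+1))).map ((i0+1) + ·) := by
    rw [List.filter_map, List.map_map]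
    apply List.map_congr_left
    intro k _
    simp only [Function.comp_apply, Nat.succ_eq_add_one]
    omega
  by_cases h0 : p 0
  · rw [if_pos h0, if_pos h0]
    simp only [List.map_cons, List.cons_append, List.nil_append, Nat.add_zero]
    rw [hrest]
  · rw [if_neg h0, if_neg h0, List.nil_append, hrest]

-- one cons-step of the main lemma, for a generic aligned branch

theorem hits_step (ch : Char) (rest : List Char) (i0 : Nat) (inS inS' esc' m0 : Bool)
    (hhead : (if ch = ':' ∧ inS = false then [i0] else []) =
      (if (m0 && (ch == ':')) = true then [i0] else []))
    (ih : ∀ (inS esc : Bool) (i0 : Nat),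
      hitsIdx rest inS esc i0 =
        ((List.range rest.length).filter
          (fun k => (maskGoA rest inS esc).getD k false && (rest.getD k ' ' == ':'))).map (i0 + ·)) :
    (if ch = ':' ∧ inS = false then [i0] else []) ++ hitsIdx rest inS' esc' (i0+1) =
      ((List.range (ch :: rest).length).filter
        (fun k => (m0 :: maskGoA rest inS' esc').getD k false && ((ch :: rest).getD k ' ' == ':'))).map (i0 + ·) := by
  rw [List.length_cons, filter_range_cons]
  have htail : hitsIdx rest inS' esc' (i0+1) =
      ((List.range rest.length).filter
        (fun k => (m0 :: maskGoA rest inS' esc').getD (k+1) false && ((ch :: rest).getD (k+1) ' ' == ':'))).map ((i0+1) + ·) := by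
    rw [ih]
    simp [List.getD_cons_succ]
  rw [htail]
  congr 1
  try simpa using hhead

theorem hits_step' (ch : Char) (rest : List Char) (i0 : Nat) (inS' esc' m0 : Bool)
    (hhead : (m0 && (ch == ':')) = false)
    (ih : ∀ (inS esc : Bool) (i0 : Nat),
      hitsIdx rest inS esc i0 =
        ((List.range rest.length).filter
          (fun k => (maskGoA rest inS esc).getD k false && (rest.getD k ' ' == ':'))).map (i0 + ·)) :
    hitsIdx rest inS' esc' (i0+1) =
      ((List.range (ch :: rest).length).filter
        (fun k => (m0 :: maskGoA rest inS' esc').getD k false && ((ch :: rest).getD k ' ' == ':'))).map (i0 + ·) := by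
  rw [List.length_cons, filter_range_cons]
  have htail : hitsIdx rest inS' esc' (i0+1) =
      ((List.range rest.length).filter
        (fun k => (m0 :: maskGoA rest inS' esc').getD (k+1) false && ((ch :: rest).getD (k+1) ' ' == ':'))).map ((i0+1) + ·) := by
    rw [ih]
    simp [List.getD_cons_succ]
  rw [htail]
  have h0 : ((m0 :: maskGoA rest inS' esc').getD 0 false && ((ch :: rest).getD 0 ' ' == ':')) = false := by
    simpa using hhead
  rw [h0]
  simp

theorem hitsIdx_eq_filter : ∀ (cs : List Char) (inS esc : Bool) (i0 : Nat),
    hitsIdx cs inS esc i0 =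
      ((List.range cs.length).filter
        (fun k => (maskGoA cs inS esc).getD k false && (cs.getD k ' ' == ':'))).map (i0 + ·) := by
  intro cs
  induction cs with
  | nil => intro inS esc i0; simp [hitsIdx, maskGoA]
  | cons ch rest ih =>
    intro inS esc i0
    by_cases h1 : esc = true
    · have hm : maskGoA (ch :: rest) inS esc = (!inS) :: maskGoA rest inS false := by
        simp [maskGoA, h1]
      have hh : hitsIdx (ch :: rest) inS esc i0 =
          (if ch = ':' ∧ inS = false then [i0] else []) ++ hitsIdx rest inS false (i0+1) := by
        simp [hitsIdx, h1]
      rw [hh, hm]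
      apply hits_step ch rest i0 inS inS false (!inS) _ ih
      by_cases hhit : ch = ':' ∧ inS = false
      · rw [if_pos hhit, if_pos (by simp [hhit.1, hhit.2])]
      · rw [if_neg hhit, if_neg ?_]
        intro hc
        simp only [Bool.and_eq_true, Bool.not_eq_true', beq_iff_eq] at hc
        exact hhit ⟨hc.2, hc.1⟩
    · by_cases h2 : ch = '\\'
      · have hm : maskGoA (ch :: rest) inS esc = (!inS) :: maskGoA rest inS true := by
          simp [maskGoA, h1, h2]
        have hh : hitsIdx (ch :: rest) inS esc i0 = hitsIdx rest inS true (i0+1) := by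
          simp [hitsIdx, h1, h2]
        rw [hh, hm]
        apply hits_step' ch rest i0 inS true (!inS) _ ih
        simp [h2]
      · by_cases h3 : ch = '"'
        · have hm : maskGoA (ch :: rest) inS esc = (!(!inS)) :: maskGoA rest (!inS) false := by
            simp [maskGoA, h1, h2, h3]
          have hh : hitsIdx (ch :: rest) inS esc i0 = hitsIdx rest (!inS) false (i0+1) := by
            simp [hitsIdx, h1, h2, h3]
          rw [hh, hm]
          apply hits_step' ch rest i0 (!inS) false (!(!inS)) _ ih
          simp [h3]
        · have hm : maskGoA (ch :: rest) inS esc = (!inS) :: maskGoA rest inS false := by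
            simp [maskGoA, h1, h2, h3]
          have hh : hitsIdx (ch :: rest) inS esc i0 =
              (if ch = ':' ∧ inS = false then [i0] else []) ++ hitsIdx rest inS false (i0+1) := by
            simp [hitsIdx, h1, h2, h3]
          rw [hh, hm]
          apply hits_step ch rest i0 inS inS false (!inS) _ ih
          by_cases hhit : ch = ':' ∧ inS = false
          · rw [if_pos hhit, if_pos (by simp [hhit.1, hhit.2])]
          · rw [if_neg hhit, if_neg ?_]
            intro hc
            simp only [Bool.and_eq_true, Bool.not_eq_true', beq_iff_eq] at hc
            exact hhit ⟨hc.2, hc.1⟩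

theorem downA_eq_getLast (mask : List Bool) (chars : List Char) : ∀ (E : Nat),
    downA mask chars E =
      ((List.range (E+1)).filter (fun k => mask.getD k false && (chars.getD k ' ' == ':'))).getLast? := by
  intro E
  induction E with
  | zero =>
    by_cases h : (mask.getD 0 false && (chars.getD 0 ' ' == ':')) = true
    · simp [downA, h, List.range_succ]
    · simp [downA, h, List.range_succ, Bool.not_eq_true] at h ⊢
  | succ E ih =>
    by_cases h : (mask.getD (E+1) false && (chars.getD (E+1) ' ' == ':')) = true
    · rw [show E+1+1 = (E+1)+1 from rfl, List.range_succ, List.filter_append]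
      simp only [downA, if_pos h, List.filter_cons, h, List.filter_nil]
      simp
    · rw [show E+1+1 = (E+1)+1 from rfl, List.range_succ, List.filter_append]
      simp only [downA, if_neg h]
      rw [ih]
      simp only [List.filter_cons]
      rw [if_neg h]
      simp

theorem colGoB_eq_foldl (e : Int) : ∀ (cs : List Char) (i0 : Nat) (inS esc : Bool) (c : Int),
    colGoB e cs i0 inS esc c =
      (hitsIdx cs inS esc i0).foldl (fun (b : Int) (k : Nat) => if (k : Int) ≤ e then (k : Int) else b) c := by
  intro cs
  induction cs with
  | nil => intro i0 inS esc c; simp [colGoB, hitsIdx]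
  | cons ch rest ih =>
    intro i0 inS esc c
    by_cases h1 : esc = true
    · by_cases hhit : ch = ':' ∧ inS = false
      · simp only [colGoB, hitsIdx, if_pos h1, if_pos hhit, List.singleton_append, List.foldl_cons]
        rw [ih]
        congr 1
        by_cases hle : (i0 : Int) ≤ e
        · rw [if_pos ⟨hhit.1, hhit.2, hle⟩, if_pos hle]
        · rw [if_neg (by tauto), if_neg hle]
      · simp only [colGoB, hitsIdx, if_pos h1, if_neg hhit, List.nil_append]
        rw [ih, if_neg (by tauto)]
    · by_cases h2 : ch = '\\'
      · simp only [colGoB, hitsIdx, if_neg h1, if_pos h2]; exact ih ..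
      · by_cases h3 : ch = '"'
        · simp only [colGoB, hitsIdx, if_neg h1, if_neg h2, if_pos h3]; exact ih ..
        · by_cases hhit : ch = ':' ∧ inS = false
          · simp only [colGoB, hitsIdx, if_neg h1, if_neg h2, if_neg h3, if_pos hhit,
              List.singleton_append, List.foldl_cons]
            rw [ih]
            congr 1
            by_cases hle : (i0 : Int) ≤ e
            · rw [if_pos ⟨hhit.1, hhit.2, hle⟩, if_pos hle]
            · rw [if_neg (by tauto), if_neg hle]
          · simp only [colGoB, hitsIdx, if_neg h1, if_neg h2, if_neg h3, if_neg hhit, List.nil_append]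
            rw [ih, if_neg (by tauto)]

theorem foldl_overwrite (e : Int) : ∀ (l : List Nat) (c : Int),
    l.foldl (fun (b : Int) (k : Nat) => if (k : Int) ≤ e then (k : Int) else b) c =
      ((l.filter (fun (k : Nat) => decide ((k : Int) ≤ e))).getLast?).elim c (fun (k : Nat) => (k : Int)) := by
  intro l
  induction l with
  | nil => intro c; simp
  | cons k l ih =>
    intro c
    by_cases hk : (k : Int) ≤ e
    · rw [List.foldl_cons, if_pos hk, ih]
      have hf : (k :: l).filter (fun (k : Nat) => decide ((k : Int) ≤ e)) =
          k :: l.filter (fun (k : Nat) => decide ((k : Int) ≤ e)) := by simp [List.filter_cons, hk]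
      rw [hf]
      cases hfl : l.filter (fun (k : Nat) => decide ((k : Int) ≤ e)) with
      | nil => simp
      | cons a t =>
        rw [List.getLast?_cons_cons]
        cases h : (a :: t).getLast? with
        | none => simp at h
        | some x => simp
    · rw [List.foldl_cons, if_neg hk, ih]
      have hf : (k :: l).filter (fun (k : Nat) => decide ((k : Int) ≤ e)) =
          l.filter (fun (k : Nat) => decide ((k : Int) ≤ e)) := by simp [List.filter_cons, hk]
      rw [hf]

theorem filter_range_trunc (Q : Nat → Bool) : ∀ (n E : Nat), E < n →
    (List.range n).filter (fun k => Q k && decide (k ≤ E)) = (List.range (E+1)).filter Q := by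
  intro n
  induction n with
  | zero => intro E h; omega
  | succ m ih =>
    intro E h
    by_cases hE : E = m
    · subst hE
      apply List.filter_congr
      intro k hk
      simp only [List.mem_range, Nat.lt_succ_iff] at hk
      simp [hk]
    · have hlt : E < m := by omega
      rw [List.range_succ, List.filter_append, ih E hlt]
      have : (Q m && decide (m ≤ E)) = false := by simp; omega
      simp [this]

theorem skipA_eq (chars : List Char) : ∀ (fuel s : Nat), chars.length - s ≤ fuel →
    skipA chars fuel s = s + ((chars.drop s).takeWhile PySem.Chars.isspace).length := by
  intro fuel
  induction fuel with
  | zero =>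
    intro s h
    have : chars.drop s = [] := List.drop_eq_nil_of_le (by omega)
    simp [skipA, this]
  | succ fuel ih =>
    intro s h
    by_cases hs : s < chars.length
    · have hdrop : chars.drop s = chars[s] :: chars.drop (s+1) := List.drop_eq_getElem_cons hs
      have hgetD : chars.getD s ' ' = chars[s] := List.getD_eq_getElem chars ' ' hs
      by_cases hsp : PySem.Chars.isspace chars[s] = true
      · rw [show skipA chars (fuel+1) s = skipA chars fuel (s+1) by
            simp [skipA, hs, hgetD, hsp]]
        rw [ih (s+1) (by omega), hdrop, List.takeWhile_cons, if_pos hsp, List.length_cons]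
        omega
      · have hcond : ¬(s < chars.length ∧ PySem.Chars.isspace (chars.getD s ' ') = true) := by
          rw [hgetD]; exact fun hc => hsp hc.2
        rw [show skipA chars (fuel+1) s = s by rw [skipA, if_neg hcond]]
        rw [hdrop, List.takeWhile_cons, if_neg hsp]
        simp
    · have : chars.drop s = [] := List.drop_eq_nil_of_le (by omega)
      have hcond : ¬(s < chars.length ∧ PySem.Chars.isspace (chars.getD s ' ') = true) := by
        exact fun hc => hs hc.1
      rw [show skipA chars (fuel+1) s = s by rw [skipA, if_neg hcond]]
      simp [this]

theorem scanA_eq (chars : List Char) : ∀ (fuel j : Nat) (db dk dp : Int) (inS esc : Bool),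
    chars.length - j ≤ fuel →
    scanA chars fuel j db dk dp inS esc = j + valueLenB (chars.drop j) db dk dp inS esc := by
  intro fuel
  induction fuel with
  | zero =>
    intro j db dk dp inS esc h
    have : chars.drop j = [] := List.drop_eq_nil_of_le (by omega)
    simp [scanA, this, valueLenB]
  | succ fuel ih =>
    intro j db dk dp inS esc h
    by_cases hj : j < chars.length
    · have hdrop : chars.drop j = chars[j] :: chars.drop (j+1) := List.drop_eq_getElem_cons hj
      have hgetD : chars.getD j ' ' = chars[j] := List.getD_eq_getElem chars ' ' hj
      rw [hdrop, scanA, valueLenB, if_pos hj, hgetD]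
      by_cases h1 : esc = true
      · simp only [if_pos h1]; rw [ih (j+1) _ _ _ _ _ (by omega)]; omega
      · simp only [if_neg h1]
        by_cases h2 : chars[j] = '\\' ∧ inS = true
        · simp only [if_pos h2]; rw [ih (j+1) _ _ _ _ _ (by omega)]; omega
        · simp only [if_neg h2]
          by_cases h3 : chars[j] = '"'
          · simp only [if_pos h3]; rw [ih (j+1) _ _ _ _ _ (by omega)]; omega
          · simp only [if_neg h3]
            by_cases h4 : inS = false
            · simp only [if_pos h4]
              by_cases h5 : chars[j] = '{'
              · simp only [if_pos h5]; rw [ih (j+1) _ _ _ _ _ (by omega)]; omega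
              · simp only [if_neg h5]
                by_cases h6 : chars[j] = '}'
                · simp only [if_pos h6]
                  by_cases h7 : db = 0 ∧ dk = 0 ∧ dp = 0
                  · simp only [if_pos h7]; omega
                  · simp only [if_neg h7]; rw [ih (j+1) _ _ _ _ _ (by omega)]; omega
                · simp only [if_neg h6]
                  by_cases h8 : chars[j] = '['
                  · simp only [if_pos h8]; rw [ih (j+1) _ _ _ _ _ (by omega)]; omega
                  · simp only [if_neg h8]
                    by_cases h9 : chars[j] = ']'
                    · simp only [if_pos h9]
                      by_cases h10 : db = 0 ∧ dk = 0 ∧ dp = 0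
                      · simp only [if_pos h10]; omega
                      · simp only [if_neg h10]; rw [ih (j+1) _ _ _ _ _ (by omega)]; omega
                    · simp only [if_neg h9]
                      by_cases h11 : chars[j] = '('
                      · simp only [if_pos h11]; rw [ih (j+1) _ _ _ _ _ (by omega)]; omega
                      · simp only [if_neg h11]
                        by_cases h12 : chars[j] = ')'
                        · simp only [if_pos h12]; rw [ih (j+1) _ _ _ _ _ (by omega)]; omega
                        · simp only [if_neg h12]
                          by_cases h13 : chars[j] = ',' ∧ db = 0 ∧ dk = 0 ∧ dp = 0
                          · simp only [if_pos h13]; omega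
                          · simp only [if_neg h13]; rw [ih (j+1) _ _ _ _ _ (by omega)]; omega
            · simp only [if_neg h4]; rw [ih (j+1) _ _ _ _ _ (by omega)]; omega
    · have hdrop : chars.drop j = [] := List.drop_eq_nil_of_le (by omega)
      rw [show scanA chars (fuel+1) j db dk dp inS esc = j by simp [scanA, hj]]
      simp [hdrop, valueLenB]

theorem length_take_drop_while (p : Char → Bool) (l : List Char) :
    (l.takeWhile p).length + (l.dropWhile p).length = l.length := by
  conv_rhs => rw [← List.takeWhile_append_dropWhile (p := p) (l := l)]
  rw [List.length_append]

theorem main_eq (doc : String) (err_pos : Int) (hpre : err_pos < (doc.toList.length : Int)) :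
    find_value_bounds_py doc err_pos = find_value_bounds_py_alt doc err_pos := by
  have hcol0 : colGoB err_pos doc.toList 0 false false (-1) =
      (((List.range doc.toList.length).filter
          (fun k => (maskGoA doc.toList false false).getD k false && (doc.toList.getD k ' ' == ':'))).filter
        (fun (k : Nat) => decide ((k : Int) ≤ err_pos))).getLast?.elim (-1) (fun (k : Nat) => (k : Int)) := by
    rw [colGoB_eq_foldl, hitsIdx_eq_filter, foldl_overwrite]
    simp [Nat.zero_add, List.map_id']
  by_cases hneg : err_pos < 0
  · -- both give (err_pos, err_pos)
    have hfilt : (((List.range doc.toList.length).filter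
          (fun k => (maskGoA doc.toList false false).getD k false && (doc.toList.getD k ' ' == ':'))).filter
        (fun (k : Nat) => decide ((k : Int) ≤ err_pos))) = [] := by
      apply List.filter_eq_nil_iff.mpr
      intro k _
      simp only [decide_eq_true_eq]
      omega
    simp only [find_value_bounds_py, find_value_bounds_py_alt, if_pos hneg, hcol0, hfilt]
    simp
  · have hE : err_pos.toNat < doc.toList.length := by omega
    have hcast : ((err_pos.toNat : Int)) = err_pos := by omega
    -- rewrite B's colon as A's backward-scan result
    have hcol : colGoB err_pos doc.toList 0 false false (-1) =
        (downA (maskGoA doc.toList false false) doc.toList err_pos.toNat).elim (-1) (fun (k : Nat) => (k : Int)) := by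
      rw [hcol0, downA_eq_getLast, List.filter_filter, ← filter_range_trunc
        (fun k => (maskGoA doc.toList false false).getD k false && (doc.toList.getD k ' ' == ':'))
        doc.toList.length err_pos.toNat hE]
      congr 2
      apply List.filter_congr
      intro k _
      rw [Bool.and_comm]
      congr 1
      rw [decide_eq_decide]
      omega
    cases hdown : downA (maskGoA doc.toList false false) doc.toList err_pos.toNat with
    | none =>
      simp only [find_value_bounds_py, find_value_bounds_py_alt, if_neg hneg, hdown, hcol]
      simp
    | some i =>
      simp only [find_value_bounds_py, find_value_bounds_py_alt, if_neg hneg, hdown, hcol]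
      have hinonneg : ¬ ((i : Int) < 0) := by simp
      rw [Option.elim, if_neg hinonneg]
      -- start
      have hslice1 : PySem.List.slice doc.toList (some ((i : Int) + 1)) none = doc.toList.drop (i+1) := by
        rw [show ((i : Int) + 1) = (((i+1 : Nat)) : Int) by push_cast; ring]
        exact PySem.List.slice_from_natCast ..
      rw [hslice1]
      have hstart : (i : Int) + 1 + (((doc.toList.drop (i+1)).length : Int) -
          ((PySem.Chars.lstrip (doc.toList.drop (i+1))).length : Int)) =
          ((skipA doc.toList doc.toList.length (i+1) : Nat) : Int) := by
        rw [skipA_eq doc.toList doc.toList.length (i+1) (by omega)]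
        have := length_take_drop_while PySem.Chars.isspace (doc.toList.drop (i+1))
        unfold PySem.Chars.lstrip
        push_cast
        omega
      rw [hstart]
      have hslice2 : PySem.List.slice doc.toList (some ((skipA doc.toList doc.toList.length (i+1) : Nat) : Int)) none =
          doc.toList.drop (skipA doc.toList doc.toList.length (i+1)) :=
        PySem.List.slice_from_natCast ..
      rw [hslice2]
      have hscan := scanA_eq doc.toList doc.toList.length (skipA doc.toList doc.toList.length (i+1)) 0 0 0 false false (by omega)
      rw [hscan]
      push_cast
      rfl

-- ===== VERDICT (by name: the statement is the Claim_ definition above) =====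
theorem find_value_bounds_py_spec : Claim_equal_find_value_bounds_py := by
  intro doc err_pos _ hpre
  exact main_eq doc err_pos hpre
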